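-- pv_equiv track=rewrite | github.com/EliteaAI/elitea.github.io | scripts/fix-mdx-expressions.py | escape_curly_in_line
-- ===== SOURCE A (Python) =====
-- def escape_curly_in_line(line):
--     """Escape { and } that are NOT inside inline code spans or JSX component tags."""
--     result = []
--     i = 0
--     in_inline_code = False
--     while i < len(line):
--         ch = line[i]
--         if ch == chr(96):
--             # toggle inline code
--             in_inline_code = not in_inline_code
--             result.append(ch)
--         elif ch in '{' and not in_inline_code:
--             result.append('\\{')
--         elif ch in '}' and not in_inline_code:
--             result.append('\\}')
--         else:
--             result.append(ch)
--         i += 1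
--     return ''.join(result)
-- ===== SOURCE B (Python) =====
-- def escape_curly_in_line(line):
--     """Escape { and } that are NOT inside inline code spans or JSX component tags."""
--     segments = line.split('`')
--     escaped = [seg.replace('{', '\\{').replace('}', '\\}') if i % 2 == 0 else seg
--                for i, seg in enumerate(segments)]
--     return '`'.join(escaped)
-- ===== Notes on version B (the rewrite author's own statement) =====
-- stated objective: simpler
-- what changed: A scans the line character by character with an in_inline_code toggle flag; B splits the line on backticks, escapes braces only in the even-indexed (outside-code) segments via str.replace, and rejoins with backticks.
import Mathlib
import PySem

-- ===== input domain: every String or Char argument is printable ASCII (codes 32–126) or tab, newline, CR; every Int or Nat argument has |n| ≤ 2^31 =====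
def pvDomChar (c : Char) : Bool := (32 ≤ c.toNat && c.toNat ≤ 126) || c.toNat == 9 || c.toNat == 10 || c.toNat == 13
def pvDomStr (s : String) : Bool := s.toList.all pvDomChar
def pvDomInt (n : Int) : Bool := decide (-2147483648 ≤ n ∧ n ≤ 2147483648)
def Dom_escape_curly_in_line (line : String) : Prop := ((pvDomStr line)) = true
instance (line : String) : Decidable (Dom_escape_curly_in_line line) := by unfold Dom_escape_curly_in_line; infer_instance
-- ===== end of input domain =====

-- B replaces A's char-by-char state-machine scan with split-on-backtick / escape even segments / rejoin (objective: simpler).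

-- ===== PORT A =====
-- the while-loop over i with the in_inline_code toggle, appending string pieces to `result`
def pvALoop : List Char → Bool → List (List Char) → List (List Char)
  | [], _, result => result
  | ch :: rest, in_inline_code, result =>
    if ch = Char.ofNat 96 then
      pvALoop rest (!in_inline_code) (result ++ [[ch]])
    else if ch == '{' && !in_inline_code then
      pvALoop rest in_inline_code (result ++ [['\\', '{']])
    else if ch == '}' && !in_inline_code then
      pvALoop rest in_inline_code (result ++ [['\\', '}']])
    else
      pvALoop rest in_inline_code (result ++ [[ch]])

def escape_curly_in_line (line : String) : String :=
  String.ofList (PySem.Chars.join [] (pvALoop line.toList false []))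

-- ===== PORT B =====
-- seg.replace('{', '\\{').replace('}', '\\}')
def pvEscSeg (seg : List Char) : List Char :=
  PySem.Chars.replace (PySem.Chars.replace seg ['{'] ['\\', '{']) ['}'] ['\\', '}']

def escape_curly_in_line_alt (line : String) : String :=
  let segments := PySem.Chars.splitOn line.toList ['`']
  let escaped := segments.mapIdx (fun i seg => if i % 2 = 0 then pvEscSeg seg else seg)
  String.ofList (PySem.Chars.join ['`'] escaped)

-- ===== PRECONDITION & SPEC =====
def Spec_escape_curly_in_line (line : String) (out : String) : Prop := out = escape_curly_in_line_alt line
instance (line : String) (out : String) : Decidable (Spec_escape_curly_in_line line out) := by unfold Spec_escape_curly_in_line; infer_instance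

-- ===== CLAIM (what is proved, stated in full; the proofs are below) =====
def Claim_equal_escape_curly_in_line : Prop := ∀ (line : String), Dom_escape_curly_in_line line → Spec_escape_curly_in_line line (escape_curly_in_line line)

-- ===== LEMMAS AND PROOFS =====

-- the escape of one character outside code
def pvEsc1 (c : Char) : List Char :=
  if c = '{' then ['\\', '{'] else if c = '}' then ['\\', '}'] else [c]

def pvConsHead (x : List Char) : List (List Char) → List (List Char)
  | [] => [x]
  | s :: t => (x ++ s) :: t

-- clean structural split on '`'
def pvSplit1 : List Char → List (List Char)
  | [] => [[]]
  | c :: rest => if c = '`' then [] :: pvSplit1 rest else pvConsHead [c] (pvSplit1 rest)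

-- alternately escape / keep segments, starting inside-code flag b
def pvAlt : Bool → List (List Char) → List (List Char)
  | _, [] => []
  | b, s :: t => (if b then s else s.flatMap pvEsc1) :: pvAlt (!b) t

-- clean form of A's scan
def pvFA : Bool → List Char → List Char
  | _, [] => []
  | b, c :: rest =>
    if c = '`' then c :: pvFA (!b) rest
    else (if b then [c] else pvEsc1 c) ++ pvFA b rest

theorem pvSplit1_ne_nil (l : List Char) : pvSplit1 l ≠ [] := by
  cases l with
  | nil => simp [pvSplit1]
  | cons c rest =>
    simp only [pvSplit1]
    split
    · simp
    · cases h : pvSplit1 rest <;> simp [pvConsHead]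

theorem pvConsHead_nil (ss : List (List Char)) (h : ss ≠ []) : pvConsHead [] ss = ss := by
  cases ss with
  | nil => exact absurd rfl h
  | cons s t => simp [pvConsHead]

theorem pvSplitOn_go_eq : ∀ (l : List Char) (fuel : Nat) (cur : List Char) (acc : List (List Char)),
    l.length ≤ fuel →
    PySem.Chars.splitOn.go ['`'] fuel l cur acc = acc.reverse ++ pvConsHead cur.reverse (pvSplit1 l) := by
  intro l
  induction l with
  | nil =>
    intro fuel cur acc _
    cases fuel <;> simp [PySem.Chars.splitOn.go, pvSplit1, pvConsHead]
  | cons c rest ih =>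
    intro fuel cur acc hf
    cases fuel with
    | zero => simp at hf
    | succ f =>
      simp only [List.length_cons, Nat.succ_le_succ_iff] at hf
      by_cases hc : c = '`'
      · subst hc
        rw [show PySem.Chars.splitOn.go ['`'] (f+1) ('`' :: rest) cur acc
              = PySem.Chars.splitOn.go ['`'] f rest [] (cur.reverse :: acc) by
            simp [PySem.Chars.splitOn.go, List.isPrefixOf]]
        rw [ih f [] (cur.reverse :: acc) hf]
        rw [show ([] : List Char).reverse = [] from rfl]
        rw [pvConsHead_nil _ (pvSplit1_ne_nil rest)]
        simp [pvSplit1, pvConsHead]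
      · rw [show PySem.Chars.splitOn.go ['`'] (f+1) (c :: rest) cur acc
              = PySem.Chars.splitOn.go ['`'] f rest (c :: cur) acc by
            simp only [PySem.Chars.splitOn.go, List.isPrefixOf]
            simp only [Bool.and_true]
            rw [if_neg (by simp [Ne.symm hc])]]
        rw [ih f (c :: cur) acc hf]
        have h1 : pvSplit1 (c :: rest) = pvConsHead [c] (pvSplit1 rest) := by
          simp [pvSplit1, hc]
        rw [h1]
        cases h : pvSplit1 rest with
        | nil => exact absurd h (pvSplit1_ne_nil rest)
        | cons s t => simp [pvConsHead]

theorem pvSplitOn_eq (l : List Char) : PySem.Chars.splitOn l ['`'] = pvSplit1 l := by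
  unfold PySem.Chars.splitOn
  rw [pvSplitOn_go_eq l (l.length + 1) [] [] (by omega)]
  simp [pvConsHead_nil _ (pvSplit1_ne_nil l)]

theorem pvReplace_go_eq (o : Char) (nw : List Char) :
    ∀ (l : List Char) (fuel : Nat) (acc : List Char), l.length ≤ fuel →
    PySem.Chars.replace.go [o] nw fuel l acc
      = acc.reverse ++ l.flatMap (fun c => if c = o then nw else [c]) := by
  intro l
  induction l with
  | nil =>
    intro fuel acc _
    cases fuel <;> simp [PySem.Chars.replace.go]
  | cons c rest ih =>
    intro fuel acc hf
    cases fuel with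
    | zero => simp at hf
    | succ f =>
      simp only [List.length_cons, Nat.succ_le_succ_iff] at hf
      by_cases hc : c = o
      · subst hc
        rw [show PySem.Chars.replace.go [c] nw (f+1) (c :: rest) acc
              = PySem.Chars.replace.go [c] nw f rest (nw.reverse ++ acc) by
            simp [PySem.Chars.replace.go, List.isPrefixOf]]
        rw [ih f (nw.reverse ++ acc) hf]
        simp
      · rw [show PySem.Chars.replace.go [o] nw (f+1) (c :: rest) acc
              = PySem.Chars.replace.go [o] nw f rest (c :: acc) by
            simp only [PySem.Chars.replace.go, List.isPrefixOf]
            simp only [Bool.and_true]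
            rw [if_neg (by simp [Ne.symm hc])]]
        rw [ih f (c :: acc) hf]
        simp [hc]

theorem pvReplace_eq (s : List Char) (o : Char) (nw : List Char) :
    PySem.Chars.replace s [o] nw = s.flatMap (fun c => if c = o then nw else [c]) := by
  unfold PySem.Chars.replace
  rw [if_neg (by simp)]
  exact (pvReplace_go_eq o nw s s.length [] (le_refl _)).trans (by simp)

theorem pvEscSeg_eq (s : List Char) : pvEscSeg s = s.flatMap pvEsc1 := by
  unfold pvEscSeg
  rw [pvReplace_eq, pvReplace_eq]
  induction s with
  | nil => simp
  | cons c rest ih =>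
    simp only [List.flatMap_cons, List.flatMap_append, ih]
    congr 1
    by_cases h1 : c = '{'
    · subst h1; decide
    · by_cases h2 : c = '}'
      · subst h2; simp [pvEsc1]
      · simp [pvEsc1, h1, h2]

theorem pvJoin_cons_append (sep p y : List Char) (t : List (List Char)) :
    PySem.Chars.join sep ((p ++ y) :: t) = p ++ PySem.Chars.join sep (y :: t) := by
  cases t with
  | nil => rw [PySem.Chars.join_singleton, PySem.Chars.join_singleton]
  | cons z zs =>
    rw [PySem.Chars.join_cons_cons, PySem.Chars.join_cons_cons]
    simp [List.append_assoc]

theorem pvAlt_ne_nil (b : Bool) (ss : List (List Char)) (h : ss ≠ []) : pvAlt b ss ≠ [] := by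
  cases ss with
  | nil => exact absurd rfl h
  | cons s t => simp [pvAlt]

theorem pvMain : ∀ (l : List Char) (b : Bool),
    pvFA b l = PySem.Chars.join ['`'] (pvAlt b (pvSplit1 l)) := by
  intro l
  induction l with
  | nil =>
    intro b
    cases b <;> simp [pvFA, pvSplit1, pvAlt, PySem.Chars.join_singleton]
  | cons c rest ih =>
    intro b
    by_cases hc : c = '`'
    · subst hc
      have h1 : pvSplit1 ('`' :: rest) = [] :: pvSplit1 rest := by simp [pvSplit1]
      rw [h1]
      have h2 : pvAlt b ([] :: pvSplit1 rest) = [] :: pvAlt (!b) (pvSplit1 rest) := by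
        cases b <;> simp [pvAlt]
      rw [h2]
      cases h3 : pvAlt (!b) (pvSplit1 rest) with
      | nil => exact absurd h3 (pvAlt_ne_nil _ _ (pvSplit1_ne_nil rest))
      | cons y ys =>
        rw [PySem.Chars.join_cons_cons]
        have h4 : pvFA b ('`' :: rest) = '`' :: pvFA (!b) rest := by simp [pvFA]
        rw [h4, ih (!b), h3]
        simp
    · have h1 : pvSplit1 (c :: rest) = pvConsHead [c] (pvSplit1 rest) := by simp [pvSplit1, hc]
      cases h : pvSplit1 rest with
      | nil => exact absurd h (pvSplit1_ne_nil rest)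
      | cons s t =>
        rw [h1, h]
        have h2 : pvConsHead [c] (s :: t) = ([c] ++ s) :: t := by simp [pvConsHead]
        rw [h2]
        have h3 : pvAlt b ((([c] ++ s)) :: t)
            = ((if b then [c] else pvEsc1 c) ++ (if b then s else s.flatMap pvEsc1)) :: pvAlt (!b) t := by
          cases b <;> simp [pvAlt, pvEsc1]
        rw [h3, pvJoin_cons_append]
        have h4 : pvFA b (c :: rest) = (if b then [c] else pvEsc1 c) ++ pvFA b rest := by
          simp [pvFA, hc]
        rw [h4, ih b, h]
        have h5 : pvAlt b (s :: t) = (if b then s else s.flatMap pvEsc1) :: pvAlt (!b) t := by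
          cases b <;> simp [pvAlt]
        rw [h5]

theorem pvJoin0 (ss : List (List Char)) : PySem.Chars.join [] ss = ss.flatten := by
  induction ss with
  | nil => simp [PySem.Chars.join_nil]
  | cons a t ih =>
    cases t with
    | nil => simp [PySem.Chars.join_singleton]
    | cons b u =>
      rw [PySem.Chars.join_cons_cons]
      simp only [List.flatten_cons]
      rw [ih]
      simp

theorem pvALoop_eq : ∀ (l : List Char) (b : Bool) (result : List (List Char)),
    PySem.Chars.join [] (pvALoop l b result) = PySem.Chars.join [] result ++ pvFA b l := by
  intro l
  induction l with
  | nil => intro b result; simp [pvALoop, pvFA]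
  | cons c rest ih =>
    intro b result
    by_cases hc : c = Char.ofNat 96
    · have hc' : c = '`' := hc
      subst hc'
      rw [show pvALoop ('`' :: rest) b result = pvALoop rest (!b) (result ++ [['`']]) by
        simp [pvALoop]]
      rw [ih (!b) (result ++ [['`']])]
      rw [show pvFA b ('`' :: rest) = '`' :: pvFA (!b) rest by simp [pvFA]]
      rw [pvJoin0, pvJoin0]
      simp
    · have hc' : ¬ c = '`' := hc
      have hfa : pvFA b (c :: rest) = (if b then [c] else pvEsc1 c) ++ pvFA b rest := by
        simp [pvFA, hc']
      cases b with
      | true =>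
        rw [show pvALoop (c :: rest) true result = pvALoop rest true (result ++ [[c]]) by
          simp [pvALoop, hc]]
        rw [ih true (result ++ [[c]]), hfa]
        rw [pvJoin0, pvJoin0]
        simp
      | false =>
        by_cases h1 : c = '{'
        · subst h1
          rw [show pvALoop ('{' :: rest) false result = pvALoop rest false (result ++ [['\\', '{']]) by
            simp [pvALoop, hc]]
          rw [ih false (result ++ [['\\', '{']]), hfa]
          rw [pvJoin0, pvJoin0]
          simp [pvEsc1]
        · by_cases h2 : c = '}'
          · subst h2
            rw [show pvALoop ('}' :: rest) false result = pvALoop rest false (result ++ [['\\', '}']]) by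
              simp [pvALoop, hc]]
            rw [ih false (result ++ [['\\', '}']]), hfa]
            rw [pvJoin0, pvJoin0]
            simp [pvEsc1]
          · rw [show pvALoop (c :: rest) false result = pvALoop rest false (result ++ [[c]]) by
              simp [pvALoop, hc, h1, h2]]
            rw [ih false (result ++ [[c]]), hfa]
            rw [pvJoin0, pvJoin0]
            simp [pvEsc1, h1, h2]

theorem pvMapIdx_eq : ∀ (ss : List (List Char)) (n : Nat),
    ss.mapIdx (fun i s => if (i + n) % 2 = 0 then pvEscSeg s else s)
      = pvAlt (decide (n % 2 = 1)) ss := by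
  intro ss
  induction ss with
  | nil => intro n; simp [pvAlt]
  | cons s t ih =>
    intro n
    rw [List.mapIdx_cons]
    have hfun : (fun (i : Nat) (x : List Char) => if (i + 1 + n) % 2 = 0 then pvEscSeg x else x)
        = (fun (i : Nat) (x : List Char) => if (i + (n + 1)) % 2 = 0 then pvEscSeg x else x) := by
      funext i x
      have : i + 1 + n = i + (n + 1) := by omega
      rw [this]
    rw [hfun, ih (n + 1)]
    have hpar : (n + 1) % 2 = 1 ↔ ¬ (n % 2 = 1) := by omega
    rcases Nat.mod_two_eq_zero_or_one n with h | h
    · have hb : decide (n % 2 = 1) = false := by simp [h]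
      have hb' : decide ((n + 1) % 2 = 1) = true := by simp; omega
      rw [hb, hb']
      simp only [pvAlt, Bool.not_false]
      rw [if_pos (by omega : (0 + n) % 2 = 0)]
      rw [pvEscSeg_eq]
      simp
    · have hb : decide (n % 2 = 1) = true := by simp [h]
      have hb' : decide ((n + 1) % 2 = 1) = false := by simp; omega
      rw [hb, hb']
      simp only [pvAlt, Bool.not_true]
      rw [if_neg (by omega : ¬ (0 + n) % 2 = 0)]
      simp

-- ===== VERDICT (by name: the statement is the Claim_ definition above) =====
theorem escape_curly_in_line_spec : Claim_equal_escape_curly_in_line := by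
  intro line _
  unfold Spec_escape_curly_in_line escape_curly_in_line escape_curly_in_line_alt
  rw [pvALoop_eq line.toList false []]
  rw [pvSplitOn_eq]
  have hm : (pvSplit1 line.toList).mapIdx (fun i seg => if i % 2 = 0 then pvEscSeg seg else seg)
      = pvAlt false (pvSplit1 line.toList) := by
    have := pvMapIdx_eq (pvSplit1 line.toList) 0
    simpa using this
  simp only []
  rw [hm, ← pvMain line.toList false]
  simp [PySem.Chars.join_nil]
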